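-- pv_equiv track=rewrite | github.com/robertoallende/coderipple | coderipple/src/historian_agent.py | _identify_decision_changes
-- ===== SOURCE A (Python) =====
-- from typing import Dict, Any, List, Optional
--
-- def _identify_decision_changes(change_type: str, affected_files: List[str], commit_messages: List[str]) -> Dict[str, Any]:
--     """Identify which changes represent significant decisions or learnings"""
--
--     decision_indicators = {
--         'architectural_decisions': ['architecture', 'design', 'pattern', 'structure', 'framework'],
--         'technology_migrations': ['migrate', 'upgrade', 'replace', 'switch', 'dependency', 'version'],
--         'refactoring_decisions': ['refactor', 'restructure', 'reorganize', 'cleanup', 'simplify'],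
--         'problem_evolution': ['requirement', 'spec', 'change', 'update', 'modify', 'enhance'],
--         'failed_experiments': ['revert', 'rollback', 'remove', 'disable', 'deprecated']
--     }
--
--     identified_changes = {}
--
--     for category, indicators in decision_indicators.items():
--         matches = []
--
--         # Check files for structural patterns
--         for file in affected_files:
--             if category == 'architectural_decisions' and any(pattern in file.lower() for pattern in ['src/', 'lib/', 'core/', 'main']):
--                 matches.append(f"File: {file}")
--             elif category == 'technology_migrations' and any(pattern in file.lower() for pattern in ['requirements', 'package.json', 'dockerfile', 'config']):
--                 matches.append(f"File: {file}")
--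
--         # Check commit messages for decision keywords
--         for msg in commit_messages:
--             if any(indicator in msg.lower() for indicator in indicators):
--                 matches.append(f"Commit: {msg[:50]}...")
--
--         if matches:
--             identified_changes[category] = matches
--
--     return identified_changes
-- ===== SOURCE B (Python) =====
-- from typing import Dict, Any, List
--
-- _ARCH_FILE_PATTERNS = ['src/', 'lib/', 'core/', 'main']
-- _TECH_FILE_PATTERNS = ['requirements', 'package.json', 'dockerfile', 'config']
-- _ARCH_INDICATORS = ['architecture', 'design', 'pattern', 'structure', 'framework']
-- _TECH_INDICATORS = ['migrate', 'upgrade', 'replace', 'switch', 'dependency', 'version']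
-- _REFAC_INDICATORS = ['refactor', 'restructure', 'reorganize', 'cleanup', 'simplify']
-- _PROB_INDICATORS = ['requirement', 'spec', 'change', 'update', 'modify', 'enhance']
-- _FAIL_INDICATORS = ['revert', 'rollback', 'remove', 'disable', 'deprecated']
--
--
-- def _identify_decision_changes(change_type: str, affected_files: List[str], commit_messages: List[str]) -> Dict[str, Any]:
--     arch, tech, refac, prob, fail = [], [], [], [], []
--     # one pass over files fills the two file-sensitive buckets
--     for file in affected_files:
--         fl = file.lower()
--         if any(p in fl for p in _ARCH_FILE_PATTERNS):
--             arch.append(f"File: {file}")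
--         if any(p in fl for p in _TECH_FILE_PATTERNS):
--             tech.append(f"File: {file}")
--     # one pass over messages buckets each message into every matching category
--     for msg in commit_messages:
--         ml = msg.lower()
--         entry = f"Commit: {msg[:50]}..."
--         if any(i in ml for i in _ARCH_INDICATORS):
--             arch.append(entry)
--         if any(i in ml for i in _TECH_INDICATORS):
--             tech.append(entry)
--         if any(i in ml for i in _REFAC_INDICATORS):
--             refac.append(entry)
--         if any(i in ml for i in _PROB_INDICATORS):
--             prob.append(entry)
--         if any(i in ml for i in _FAIL_INDICATORS):
--             fail.append(entry)
--     return {k: v for k, v in [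
--         ('architectural_decisions', arch),
--         ('technology_migrations', tech),
--         ('refactoring_decisions', refac),
--         ('problem_evolution', prob),
--         ('failed_experiments', fail),
--     ] if v}
-- ===== Notes on version B (the rewrite author's own statement) =====
-- stated objective: alternative
-- what changed: Instead of A's per-category loop that rescans all files and all messages five times, B makes one pass over the files and one pass over the messages, bucketing each item into all matching category lists at once, then keeps the non-empty buckets.
import Mathlib
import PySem

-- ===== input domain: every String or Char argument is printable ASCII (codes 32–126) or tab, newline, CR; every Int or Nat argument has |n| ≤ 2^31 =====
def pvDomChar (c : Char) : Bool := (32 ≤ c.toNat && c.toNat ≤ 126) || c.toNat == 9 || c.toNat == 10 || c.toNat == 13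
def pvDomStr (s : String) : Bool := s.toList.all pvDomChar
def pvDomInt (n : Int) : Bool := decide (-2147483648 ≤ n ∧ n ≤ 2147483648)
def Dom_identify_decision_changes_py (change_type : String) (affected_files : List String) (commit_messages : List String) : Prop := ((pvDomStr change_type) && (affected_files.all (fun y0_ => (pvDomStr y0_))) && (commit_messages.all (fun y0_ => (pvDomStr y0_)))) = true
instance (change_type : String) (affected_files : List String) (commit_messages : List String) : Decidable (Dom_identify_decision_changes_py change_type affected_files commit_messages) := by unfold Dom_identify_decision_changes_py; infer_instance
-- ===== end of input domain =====

-- B replaces A's per-category rescans of files and messages with a single pass over each,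
-- bucketing into five lists at once (objective: alternative decomposition, same results).


-- shared helpers (identical formatting/membership expressions in both Pythons)
def pvAnyIn (pats : List String) (s : String) : Bool := pats.any (fun p => PySem.Str.isIn p s)
def pvFmtFile (f : String) : String := "File: " ++ f
def pvFmtCommit (m : String) : String := "Commit: " ++ PySem.Str.slice m none (some 50) ++ "..."

-- ===== PORT A =====
def pvCatsA : List (String × List String) :=
  [("architectural_decisions", ["architecture", "design", "pattern", "structure", "framework"]),
   ("technology_migrations", ["migrate", "upgrade", "replace", "switch", "dependency", "version"]),
   ("refactoring_decisions", ["refactor", "restructure", "reorganize", "cleanup", "simplify"]),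
   ("problem_evolution", ["requirement", "spec", "change", "update", "modify", "enhance"]),
   ("failed_experiments", ["revert", "rollback", "remove", "disable", "deprecated"])]

def identify_decision_changes_py (change_type : String) (affected_files : List String) (commit_messages : List String) : List (String × List String) :=
  pvCatsA.foldl (fun identified ci =>
    let category := ci.1
    let indicators := ci.2
    let fms := affected_files.foldl (fun acc file =>
      if category == "architectural_decisions" && pvAnyIn ["src/", "lib/", "core/", "main"] (PySem.Str.lower file) then acc ++ [pvFmtFile file]
      else if category == "technology_migrations" && pvAnyIn ["requirements", "package.json", "dockerfile", "config"] (PySem.Str.lower file) then acc ++ [pvFmtFile file]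
      else acc) []
    let ms := commit_messages.foldl (fun acc msg =>
      if pvAnyIn indicators (PySem.Str.lower msg) then acc ++ [pvFmtCommit msg] else acc) fms
    if ms.isEmpty then identified else identified ++ [(category, ms)]) []

-- ===== PORT B =====
def pvArchFilePats : List String := ["src/", "lib/", "core/", "main"]
def pvTechFilePats : List String := ["requirements", "package.json", "dockerfile", "config"]
def pvArchInds : List String := ["architecture", "design", "pattern", "structure", "framework"]
def pvTechInds : List String := ["migrate", "upgrade", "replace", "switch", "dependency", "version"]
def pvRefacInds : List String := ["refactor", "restructure", "reorganize", "cleanup", "simplify"]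
def pvProbInds : List String := ["requirement", "spec", "change", "update", "modify", "enhance"]
def pvFailInds : List String := ["revert", "rollback", "remove", "disable", "deprecated"]

def identify_decision_changes_py_alt (change_type : String) (affected_files : List String) (commit_messages : List String) : List (String × List String) :=
  let fb := affected_files.foldl (fun (st : List String × List String) file =>
    let fl := PySem.Str.lower file
    (if pvAnyIn pvArchFilePats fl then st.1 ++ [pvFmtFile file] else st.1,
     if pvAnyIn pvTechFilePats fl then st.2 ++ [pvFmtFile file] else st.2)) ([], [])
  let bk := commit_messages.foldl (fun (st : List String × List String × List String × List String × List String) msg =>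
    let ml := PySem.Str.lower msg
    let entry := pvFmtCommit msg
    (if pvAnyIn pvArchInds ml then st.1 ++ [entry] else st.1,
     if pvAnyIn pvTechInds ml then st.2.1 ++ [entry] else st.2.1,
     if pvAnyIn pvRefacInds ml then st.2.2.1 ++ [entry] else st.2.2.1,
     if pvAnyIn pvProbInds ml then st.2.2.2.1 ++ [entry] else st.2.2.2.1,
     if pvAnyIn pvFailInds ml then st.2.2.2.2 ++ [entry] else st.2.2.2.2)) (fb.1, fb.2, [], [], [])
  ([("architectural_decisions", bk.1),
    ("technology_migrations", bk.2.1),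
    ("refactoring_decisions", bk.2.2.1),
    ("problem_evolution", bk.2.2.2.1),
    ("failed_experiments", bk.2.2.2.2)]).filter (fun kv => !kv.2.isEmpty)

-- ===== PRECONDITION & SPEC =====
def Spec_identify_decision_changes_py (change_type : String) (affected_files : List String) (commit_messages : List String) (out : List (String × List String)) : Prop := out = identify_decision_changes_py_alt change_type affected_files commit_messages
instance (change_type : String) (affected_files : List String) (commit_messages : List String) (out : List (String × List String)) : Decidable (Spec_identify_decision_changes_py change_type affected_files commit_messages out) := by unfold Spec_identify_decision_changes_py; infer_instance

-- ===== CLAIM (what is proved, stated in full; the proofs are below) =====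
def Claim_equal_identify_decision_changes_py : Prop := ∀ (change_type : String) (affected_files : List String) (commit_messages : List String), Dom_identify_decision_changes_py change_type affected_files commit_messages → Spec_identify_decision_changes_py change_type affected_files commit_messages (identify_decision_changes_py change_type affected_files commit_messages)

-- ===== LEMMAS AND PROOFS =====

-- pulling the [name, matches] map outside the non-empty filter
theorem pvMapIfNotEmpty (l : List (String × List String)) (m : (String × List String) -> List String) :
    (l.filter (fun ci => !(m ci).isEmpty)).map (fun ci => (ci.1, m ci))
      = (l.map (fun ci => (ci.1, m ci))).filter (fun kv => !kv.2.isEmpty) := by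
  induction l with
  | nil => rfl
  | cons x xs ih =>
    simp only [List.filter_cons, List.map_cons]
    by_cases h : (m x).isEmpty <;> simp [h, ih]

-- A's outer category loop appends the category exactly when its matches are non-empty.
theorem pvFoldlIfNot {A B : Type} (l : List A) (p : A -> Bool) (g : A -> B) (a : List B) :
    l.foldl (fun acc x => if p x = true then acc else acc ++ [g x]) a
      = a ++ (l.filter (fun x => !p x)).map g := by
  induction l generalizing a with
  | nil => simp
  | cons x xs ih =>
    simp only [List.foldl_cons, List.filter_cons]
    by_cases h : p x = true <;> simp [h, ih]

-- B's file pass accumulates, per component, exactly a filtered map.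
theorem pvFoldFiles (files : List String) (st : List String × List String) :
    files.foldl (fun (st : List String × List String) file =>
      let fl := PySem.Str.lower file
      (if pvAnyIn pvArchFilePats fl then st.1 ++ [pvFmtFile file] else st.1,
       if pvAnyIn pvTechFilePats fl then st.2 ++ [pvFmtFile file] else st.2)) st =
    (st.1 ++ (files.filter (fun f => pvAnyIn pvArchFilePats (PySem.Str.lower f))).map pvFmtFile,
     st.2 ++ (files.filter (fun f => pvAnyIn pvTechFilePats (PySem.Str.lower f))).map pvFmtFile) := by
  induction files generalizing st with
  | nil => simp
  | cons f fs ih =>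
    simp only [List.foldl_cons, ih, List.filter_cons]
    split_ifs <;> simp

-- B's message pass accumulates, per component, exactly a filtered map.
theorem pvFoldMsgs (msgs : List String) (st : List String × List String × List String × List String × List String) :
    msgs.foldl (fun (st : List String × List String × List String × List String × List String) msg =>
      let ml := PySem.Str.lower msg
      let entry := pvFmtCommit msg
      (if pvAnyIn pvArchInds ml then st.1 ++ [entry] else st.1,
       if pvAnyIn pvTechInds ml then st.2.1 ++ [entry] else st.2.1,
       if pvAnyIn pvRefacInds ml then st.2.2.1 ++ [entry] else st.2.2.1,
       if pvAnyIn pvProbInds ml then st.2.2.2.1 ++ [entry] else st.2.2.2.1,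
       if pvAnyIn pvFailInds ml then st.2.2.2.2 ++ [entry] else st.2.2.2.2)) st =
    (st.1 ++ (msgs.filter (fun m => pvAnyIn pvArchInds (PySem.Str.lower m))).map pvFmtCommit,
     st.2.1 ++ (msgs.filter (fun m => pvAnyIn pvTechInds (PySem.Str.lower m))).map pvFmtCommit,
     st.2.2.1 ++ (msgs.filter (fun m => pvAnyIn pvRefacInds (PySem.Str.lower m))).map pvFmtCommit,
     st.2.2.2.1 ++ (msgs.filter (fun m => pvAnyIn pvProbInds (PySem.Str.lower m))).map pvFmtCommit,
     st.2.2.2.2 ++ (msgs.filter (fun m => pvAnyIn pvFailInds (PySem.Str.lower m))).map pvFmtCommit) := by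
  induction msgs generalizing st with
  | nil => simp
  | cons m ms ih =>
    simp only [List.foldl_cons, ih, List.filter_cons]
    split_ifs <;> simp

-- ===== VERDICT (by name: the statement is the Claim_ definition above) =====
set_option maxHeartbeats 1000000 in
theorem identify_decision_changes_py_spec : Claim_equal_identify_decision_changes_py := by
  intro ct files msgs _
  show identify_decision_changes_py ct files msgs = identify_decision_changes_py_alt ct files msgs
  simp only [identify_decision_changes_py_alt]
  rw [pvFoldFiles, pvFoldMsgs]
  simp only [identify_decision_changes_py]
  rw [pvFoldlIfNot]
  simp only [List.nil_append]
  rw [pvMapIfNotEmpty]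
  simp only [pvCatsA, pvArchFilePats, pvTechFilePats, pvArchInds, pvTechInds, pvRefacInds,
    pvProbInds, pvFailInds, String.reduceBEq, Bool.false_and, Bool.true_and, Bool.false_eq_true,
    if_false, List.foldl_fixed, PySem.List.foldl_append_if, List.nil_append,
    List.map_cons, List.map_nil]
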